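-- pv_equiv track=rewrite | github.com/PhilipiGomes/ominoesMaze | test.py | _normalize_variants
-- ===== SOURCE A (Python) =====
-- _ROTATIONS = (
--     lambda x, y: (x, y),
--     lambda x, y: (-y, x),
--     lambda x, y: (-x, -y),
--     lambda x, y: (y, -x),
-- )
--
-- def _normalize_variants(cells):
--     pts = tuple(cells)
--     variants = []
--     for reflect in (False, True):
--         for rot_fn in _ROTATIONS:
--             transformed = []
--             if reflect:
--                 for x, y in pts:
--                     xr = -x
--                     yr = y
--                     tx, ty = rot_fn(xr, yr)
--                     transformed.append((tx, ty))
--             else: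
--                 for x, y in pts:
--                     tx, ty = rot_fn(x, y)
--                     transformed.append((tx, ty))
--             minx = min(p[0] for p in transformed)
--             miny = min(p[1] for p in transformed)
--             norm = tuple(sorted(((p[0] - minx, p[1] - miny) for p in transformed)))
--             variants.append(norm)
--     return variants
-- ===== SOURCE B (Python) =====
-- def _normalize_variants(cells):
--     xs = [p[0] for p in cells]
--     ys = [p[1] for p in cells]
--     minx, maxx = min(xs), max(xs)
--     miny, maxy = min(ys), max(ys)
--     coords = [(x - minx, maxx - x, y - miny, maxy - y) for x, y in cells]
--     orients = ((0, 2), (3, 0), (1, 3), (2, 1), (1, 2), (3, 1), (0, 3), (2, 0))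
--     return [tuple(sorted((c[i], c[j]) for c in coords)) for i, j in orients]
-- ===== Notes on version B (the rewrite author's own statement) =====
-- stated objective: alternative
-- what changed: Instead of transforming the points for each of the 8 orientations and then computing per-orientation minima to shift, B computes the bounding box (minx,maxx,miny,maxy) once, precomputes for every point the four shifted coordinates (x-minx, maxx-x, y-miny, maxy-y), and produces each variant directly as the sorted list of an index-pair selection from that table, eliminating all 16 per-orientation min scans and the transform loops.
-- outside the precondition, e.g. on _normalize_variants([]): A raises ValueError, B raises ValueError
import Mathlib
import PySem

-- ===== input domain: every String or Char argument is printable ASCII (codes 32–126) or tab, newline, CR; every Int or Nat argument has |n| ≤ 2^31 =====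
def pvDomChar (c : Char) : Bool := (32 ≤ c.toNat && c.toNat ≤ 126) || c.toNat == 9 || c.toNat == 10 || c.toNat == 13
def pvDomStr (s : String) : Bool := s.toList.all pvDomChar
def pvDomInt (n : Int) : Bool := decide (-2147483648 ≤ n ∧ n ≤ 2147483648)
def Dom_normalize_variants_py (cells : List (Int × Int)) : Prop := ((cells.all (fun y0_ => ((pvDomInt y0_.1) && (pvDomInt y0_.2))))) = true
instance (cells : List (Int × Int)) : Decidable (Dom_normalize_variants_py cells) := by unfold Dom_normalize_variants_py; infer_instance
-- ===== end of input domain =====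

-- B replaces the 8 transform-then-min-shift passes by one bounding-box pass and an index table over
-- precomputed shifted coordinates (alternative decomposition, same asymptotic cost).

-- ===== PORT A =====
-- the _ROTATIONS table
def pvRotA (i : Nat) (x y : Int) : Int × Int :=
  match i with
  | 0 => (x, y)
  | 1 => (-y, x)
  | 2 => (-x, -y)
  | _ => (y, -x)

-- min over an empty generator raises ValueError in Python; .getD 0 is only reached outside Pre_ (cells = [])
def normalize_variants_py (cells : List (Int × Int)) : List (List (Int × Int)) :=
  let pts := cells
  ([false, true]).foldl (fun variants reflect =>
    (([0, 1, 2, 3] : List Nat)).foldl (fun variants i =>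
      let transformed :=
        if reflect then
          pts.foldl (fun acc p => acc ++ [pvRotA i (-p.1) p.2]) []
        else
          pts.foldl (fun acc p => acc ++ [pvRotA i p.1 p.2]) []
      let minx := (PySem.List.min? (transformed.map (fun p => p.1)) (fun v => v)).getD 0
      let miny := (PySem.List.min? (transformed.map (fun p => p.2)) (fun v => v)).getD 0
      let norm := PySem.List.sorted2 (transformed.map (fun p => (p.1 - minx, p.2 - miny)))
        (fun p => p.1) (fun p => p.2)
      variants ++ [norm]) variants) []

-- ===== PORT B =====
-- c[i] for the 4-tuple of shifted coordinates
def pvCoord (c : Int × Int × Int × Int) (i : Nat) : Int :=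
  match i with
  | 0 => c.1
  | 1 => c.2.1
  | 2 => c.2.2.1
  | _ => c.2.2.2

-- min/max over an empty list raise ValueError in Python; .getD 0 is only reached outside Pre_ (cells = [])
def normalize_variants_py_alt (cells : List (Int × Int)) : List (List (Int × Int)) :=
  let xs := cells.map (fun p => p.1)
  let ys := cells.map (fun p => p.2)
  let minx := (PySem.List.min? xs (fun v => v)).getD 0
  let maxx := (PySem.List.max? xs (fun v => v)).getD 0
  let miny := (PySem.List.min? ys (fun v => v)).getD 0
  let maxy := (PySem.List.max? ys (fun v => v)).getD 0
  let coords := cells.map (fun p => (p.1 - minx, maxx - p.1, p.2 - miny, maxy - p.2))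
  let orients : List (Nat × Nat) := [(0, 2), (3, 0), (1, 3), (2, 1), (1, 2), (3, 1), (0, 3), (2, 0)]
  orients.map (fun ij =>
    PySem.List.sorted2 (coords.map (fun c => (pvCoord c ij.1, pvCoord c ij.2)))
      (fun p => p.1) (fun p => p.2))

-- ===== PRECONDITION & SPEC =====
-- Pre_ excludes only the empty list, on which both Pythons raise ValueError (min of an empty sequence)
def Pre_normalize_variants_py (cells : List (Int × Int)) : Prop := cells ≠ []
instance (cells : List (Int × Int)) : Decidable (Pre_normalize_variants_py cells) := by
  unfold Pre_normalize_variants_py; infer_instance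
def pvWitness_normalize_variants_py : (List (Int × Int)) := [(0, 0), (1, 0)]

def Spec_normalize_variants_py (cells : List (Int × Int)) (out : List (List (Int × Int))) : Prop := out = normalize_variants_py_alt cells
instance (cells : List (Int × Int)) (out : List (List (Int × Int))) : Decidable (Spec_normalize_variants_py cells out) := by unfold Spec_normalize_variants_py; infer_instance

-- ===== CLAIM (what is proved, stated in full; the proofs are below) =====
def Claim_equal_normalize_variants_py : Prop := ∀ (cells : List (Int × Int)), Dom_normalize_variants_py cells → Pre_normalize_variants_py cells → Spec_normalize_variants_py cells (normalize_variants_py cells)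

-- ===== LEMMAS AND PROOFS =====
theorem foldl_snoc_map {α β : Type} (f : α → β) (xs : List α) (init : List β) :
    xs.foldl (fun acc p => acc ++ [f p]) init = init ++ xs.map f := by
  induction xs generalizing init with
  | nil => simp
  | cons x t ih => simp [List.foldl, ih]

-- min of the negated values is minus the max
theorem foldl_min_neg (t : List Int) (x : Int) :
    (t.map (fun a => -a)).foldl min (-x) = -(t.foldl max x) := by
  induction t generalizing x with
  | nil => simp
  | cons h tl ih => simp [List.foldl, ← ih, min_neg_neg]

theorem foldl_min_negx (c : Int × Int) (t : List (Int × Int)) :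
    List.foldl min (-c.1) (t.map (fun p => -p.1)) = -(List.foldl max c.1 (t.map (fun p => p.1))) := by
  have h := foldl_min_neg (t.map (fun p => p.1)) c.1
  simpa [List.map_map, Function.comp_def] using h

theorem foldl_min_negy (c : Int × Int) (t : List (Int × Int)) :
    List.foldl min (-c.2) (t.map (fun p => -p.2)) = -(List.foldl max c.2 (t.map (fun p => p.2))) := by
  have h := foldl_min_neg (t.map (fun p => p.2)) c.2
  simpa [List.map_map, Function.comp_def] using h

-- the body of one iteration of A's inner loop
def pvNormA (pts : List (Int × Int)) (reflect : Bool) (i : Nat) : List (Int × Int) :=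
  let transformed :=
    if reflect then
      pts.foldl (fun acc p => acc ++ [pvRotA i (-p.1) p.2]) []
    else
      pts.foldl (fun acc p => acc ++ [pvRotA i p.1 p.2]) []
  let minx := (PySem.List.min? (transformed.map (fun p => p.1)) (fun v => v)).getD 0
  let miny := (PySem.List.min? (transformed.map (fun p => p.2)) (fun v => v)).getD 0
  PySem.List.sorted2 (transformed.map (fun p => (p.1 - minx, p.2 - miny)))
    (fun p => p.1) (fun p => p.2)

theorem A_as_list (cells : List (Int × Int)) :
    normalize_variants_py cells =
      [pvNormA cells false 0, pvNormA cells false 1, pvNormA cells false 2, pvNormA cells false 3,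
       pvNormA cells true 0, pvNormA cells true 1, pvNormA cells true 2, pvNormA cells true 3] := by
  rfl

-- the body of one of B's variants
def pvNormBv (cells : List (Int × Int)) (i j : Nat) : List (Int × Int) :=
  let xs := cells.map (fun p => p.1)
  let ys := cells.map (fun p => p.2)
  let minx := (PySem.List.min? xs (fun v => v)).getD 0
  let maxx := (PySem.List.max? xs (fun v => v)).getD 0
  let miny := (PySem.List.min? ys (fun v => v)).getD 0
  let maxy := (PySem.List.max? ys (fun v => v)).getD 0
  let coords := cells.map (fun p => (p.1 - minx, maxx - p.1, p.2 - miny, maxy - p.2))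
  PySem.List.sorted2 (coords.map (fun c => (pvCoord c i, pvCoord c j)))
    (fun p => p.1) (fun p => p.2)

theorem B_as_list (cells : List (Int × Int)) :
    normalize_variants_py_alt cells =
      [pvNormBv cells 0 2, pvNormBv cells 3 0, pvNormBv cells 1 3, pvNormBv cells 2 1,
       pvNormBv cells 1 2, pvNormBv cells 3 1, pvNormBv cells 0 3, pvNormBv cells 2 0] := by
  rfl

theorem orient_lem0 (c : Int × Int) (t : List (Int × Int)) :
    pvNormA (c :: t) false 0 = pvNormBv (c :: t) 0 2 := by
  simp only [pvNormA, pvNormBv, foldl_snoc_map, List.nil_append, List.map_map,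
    Function.comp_def, pvRotA, pvCoord, List.map_cons, PySem.List.min?_id_cons,
    PySem.List.max?_id_cons, Option.getD_some, foldl_min_negx, foldl_min_negy,
    neg_neg, sub_neg_eq_add, neg_add_eq_sub, Bool.false_eq_true, if_false, if_true]

theorem orient_lem1 (c : Int × Int) (t : List (Int × Int)) :
    pvNormA (c :: t) false 1 = pvNormBv (c :: t) 3 0 := by
  simp only [pvNormA, pvNormBv, foldl_snoc_map, List.nil_append, List.map_map,
    Function.comp_def, pvRotA, pvCoord, List.map_cons, PySem.List.min?_id_cons,
    PySem.List.max?_id_cons, Option.getD_some, foldl_min_negx, foldl_min_negy,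
    neg_neg, sub_neg_eq_add, neg_add_eq_sub, Bool.false_eq_true, if_false, if_true]

theorem orient_lem2 (c : Int × Int) (t : List (Int × Int)) :
    pvNormA (c :: t) false 2 = pvNormBv (c :: t) 1 3 := by
  simp only [pvNormA, pvNormBv, foldl_snoc_map, List.nil_append, List.map_map,
    Function.comp_def, pvRotA, pvCoord, List.map_cons, PySem.List.min?_id_cons,
    PySem.List.max?_id_cons, Option.getD_some, foldl_min_negx, foldl_min_negy,
    neg_neg, sub_neg_eq_add, neg_add_eq_sub, Bool.false_eq_true, if_false, if_true]

theorem orient_lem3 (c : Int × Int) (t : List (Int × Int)) :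
    pvNormA (c :: t) false 3 = pvNormBv (c :: t) 2 1 := by
  simp only [pvNormA, pvNormBv, foldl_snoc_map, List.nil_append, List.map_map,
    Function.comp_def, pvRotA, pvCoord, List.map_cons, PySem.List.min?_id_cons,
    PySem.List.max?_id_cons, Option.getD_some, foldl_min_negx, foldl_min_negy,
    neg_neg, sub_neg_eq_add, neg_add_eq_sub, Bool.false_eq_true, if_false, if_true]

theorem orient_lem4 (c : Int × Int) (t : List (Int × Int)) :
    pvNormA (c :: t) true 0 = pvNormBv (c :: t) 1 2 := by
  simp only [pvNormA, pvNormBv, foldl_snoc_map, List.nil_append, List.map_map,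
    Function.comp_def, pvRotA, pvCoord, List.map_cons, PySem.List.min?_id_cons,
    PySem.List.max?_id_cons, Option.getD_some, foldl_min_negx, foldl_min_negy,
    neg_neg, sub_neg_eq_add, neg_add_eq_sub, Bool.false_eq_true, if_false, if_true]

theorem orient_lem5 (c : Int × Int) (t : List (Int × Int)) :
    pvNormA (c :: t) true 1 = pvNormBv (c :: t) 3 1 := by
  simp only [pvNormA, pvNormBv, foldl_snoc_map, List.nil_append, List.map_map,
    Function.comp_def, pvRotA, pvCoord, List.map_cons, PySem.List.min?_id_cons,
    PySem.List.max?_id_cons, Option.getD_some, foldl_min_negx, foldl_min_negy,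
    neg_neg, sub_neg_eq_add, neg_add_eq_sub, Bool.false_eq_true, if_false, if_true]

theorem orient_lem6 (c : Int × Int) (t : List (Int × Int)) :
    pvNormA (c :: t) true 2 = pvNormBv (c :: t) 0 3 := by
  simp only [pvNormA, pvNormBv, foldl_snoc_map, List.nil_append, List.map_map,
    Function.comp_def, pvRotA, pvCoord, List.map_cons, PySem.List.min?_id_cons,
    PySem.List.max?_id_cons, Option.getD_some, foldl_min_negx, foldl_min_negy,
    neg_neg, sub_neg_eq_add, neg_add_eq_sub, Bool.false_eq_true, if_false, if_true]

theorem orient_lem7 (c : Int × Int) (t : List (Int × Int)) :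
    pvNormA (c :: t) true 3 = pvNormBv (c :: t) 2 0 := by
  simp only [pvNormA, pvNormBv, foldl_snoc_map, List.nil_append, List.map_map,
    Function.comp_def, pvRotA, pvCoord, List.map_cons, PySem.List.min?_id_cons,
    PySem.List.max?_id_cons, Option.getD_some, foldl_min_negx, foldl_min_negy,
    neg_neg, sub_neg_eq_add, neg_add_eq_sub, Bool.false_eq_true, if_false, if_true]

theorem main_eq (c : Int × Int) (t : List (Int × Int)) :
    normalize_variants_py (c :: t) = normalize_variants_py_alt (c :: t) := by
  rw [A_as_list, B_as_list, orient_lem0, orient_lem1, orient_lem2, orient_lem3,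
    orient_lem4, orient_lem5, orient_lem6, orient_lem7]

-- ===== VERDICT (by name: the statement is the Claim_ definition above) =====
theorem normalize_variants_py_spec : Claim_equal_normalize_variants_py := by
  intro cells _ hpre
  match cells with
  | [] => exact absurd rfl hpre
  | c :: t => simpa [Spec_normalize_variants_py] using main_eq c t
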